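-- pv_equiv track=rewrite | github.com/oakeley/FractalPangenome | advanced_genomic_analytics.py | _determine_metabolizer_status
-- ===== SOURCE A (Python) =====
-- from typing import Dict, List, Tuple, Optional, Union, Any
--
-- def _determine_metabolizer_status(pgx_variants: Dict, enzyme: str,
--                                 variant_status: Dict[str, str]) -> str:
--     """Determine metabolizer status based on detected variants"""
--
--     detected_variants = [v for v in pgx_variants.keys() if v.startswith(enzyme)]
--
--     if not detected_variants:
--         return "normal_metabolizer"  # Default assumption
--
--     # Simplified logic: use the most severe status found
--     statuses = []
--     for variant in detected_variants:
--         if variant in variant_status: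
--             statuses.append(variant_status[variant])
--
--     if "poor_metabolizer" in statuses:
--         return "poor_metabolizer"
--     elif "intermediate_metabolizer" in statuses:
--         return "intermediate_metabolizer"
--     elif "ultrarapid_metabolizer" in statuses:
--         return "ultrarapid_metabolizer"
--     else:
--         return "normal_metabolizer"
-- ===== SOURCE B (Python) =====
-- def _determine_metabolizer_status(pgx_variants, enzyme, variant_status):
--     rank = {"poor_metabolizer": 0, "intermediate_metabolizer": 1, "ultrarapid_metabolizer": 2}
--     best = min((rank.get(variant_status[v], 3)
--                 for v in pgx_variants
--                 if v.startswith(enzyme) and v in variant_status),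
--                default=3)
--     return ["poor_metabolizer", "intermediate_metabolizer",
--             "ultrarapid_metabolizer", "normal_metabolizer"][best]
-- ===== Notes on version B (the rewrite author's own statement) =====
-- stated objective: simpler
-- what changed: Replaces the two-phase build-a-status-list-then-walk-an-if/elif-priority-ladder with a single generator pass that maps each matching variant to a severity rank, takes min(..., default=3), and indexes a result table; the redundant empty-detected early return disappears.
import Mathlib
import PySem

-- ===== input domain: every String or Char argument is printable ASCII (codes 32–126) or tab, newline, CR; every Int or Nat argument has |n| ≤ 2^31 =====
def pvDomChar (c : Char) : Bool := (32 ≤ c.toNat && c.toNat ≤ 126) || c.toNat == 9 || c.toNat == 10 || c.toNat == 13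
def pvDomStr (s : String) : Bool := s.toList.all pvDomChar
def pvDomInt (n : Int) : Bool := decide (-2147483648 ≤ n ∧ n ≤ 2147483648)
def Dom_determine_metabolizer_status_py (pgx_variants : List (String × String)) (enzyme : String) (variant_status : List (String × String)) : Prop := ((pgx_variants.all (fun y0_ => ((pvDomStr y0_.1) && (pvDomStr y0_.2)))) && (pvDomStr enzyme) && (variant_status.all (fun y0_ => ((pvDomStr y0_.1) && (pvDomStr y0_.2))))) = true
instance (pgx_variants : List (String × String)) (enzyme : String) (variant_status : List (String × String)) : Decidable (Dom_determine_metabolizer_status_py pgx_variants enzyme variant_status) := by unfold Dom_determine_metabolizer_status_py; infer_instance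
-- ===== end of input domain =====

-- B replaces A's build-statuses-then-if/elif priority ladder by one pass mapping matches to a
-- severity rank, taking the min (default 3), and indexing a result table (objective: simpler).


-- ===== PORT A =====
def determine_metabolizer_status_py (pgx_variants : List (String × String)) (enzyme : String) (variant_status : List (String × String)) : String :=
  let vsd := PySem.Dict.mk variant_status
  let detected := ((PySem.Dict.mk pgx_variants).keys).filter (fun v => PySem.Str.startswith v enzyme)
  if detected.isEmpty then "normal_metabolizer"
  else
    let statuses := detected.foldl
      (fun acc variant => if vsd.contains variant then acc ++ [vsd.getD variant ""] else acc) []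
    if statuses.contains "poor_metabolizer" then "poor_metabolizer"
    else if statuses.contains "intermediate_metabolizer" then "intermediate_metabolizer"
    else if statuses.contains "ultrarapid_metabolizer" then "ultrarapid_metabolizer"
    else "normal_metabolizer"

-- ===== PORT B =====
-- rank.get(s, 3) for the literal dict {"poor…": 0, "intermediate…": 1, "ultrarapid…": 2}
def pvRank (s : String) : Nat :=
  if s = "poor_metabolizer" then 0
  else if s = "intermediate_metabolizer" then 1
  else if s = "ultrarapid_metabolizer" then 2
  else 3

def determine_metabolizer_status_py_alt (pgx_variants : List (String × String)) (enzyme : String) (variant_status : List (String × String)) : String :=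
  let vsd := PySem.Dict.mk variant_status
  let ranks := ((PySem.Dict.mk pgx_variants).keys).filterMap
    (fun v => if PySem.Str.startswith v enzyme && vsd.contains v
              then some (pvRank (vsd.getD v "")) else none)
  let best := PySem.List.minD ranks (fun r => r) 3
  ["poor_metabolizer", "intermediate_metabolizer",
   "ultrarapid_metabolizer", "normal_metabolizer"].getD best "normal_metabolizer"

-- ===== PRECONDITION & SPEC =====
def Spec_determine_metabolizer_status_py (pgx_variants : List (String × String)) (enzyme : String) (variant_status : List (String × String)) (out : String) : Prop := out = determine_metabolizer_status_py_alt pgx_variants enzyme variant_status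
instance (pgx_variants : List (String × String)) (enzyme : String) (variant_status : List (String × String)) (out : String) : Decidable (Spec_determine_metabolizer_status_py pgx_variants enzyme variant_status out) := by unfold Spec_determine_metabolizer_status_py; infer_instance

-- ===== CLAIM (what is proved, stated in full; the proofs are below) =====
def Claim_equal_determine_metabolizer_status_py : Prop := ∀ (pgx_variants : List (String × String)) (enzyme : String) (variant_status : List (String × String)), Dom_determine_metabolizer_status_py pgx_variants enzyme variant_status → Spec_determine_metabolizer_status_py pgx_variants enzyme variant_status (determine_metabolizer_status_py pgx_variants enzyme variant_status)

-- ===== LEMMAS AND PROOFS =====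

-- the value of A's priority ladder on a status list
def pvLadder (S : List String) : Nat :=
  if S.contains "poor_metabolizer" then 0
  else if S.contains "intermediate_metabolizer" then 1
  else if S.contains "ultrarapid_metabolizer" then 2
  else 3

theorem pvRank_le (s : String) : pvRank s ≤ 3 := by
  unfold pvRank; split_ifs <;> omega

theorem pvLadder_cons (s : String) (S : List String) :
    pvLadder (s :: S) = min (pvRank s) (pvLadder S) := by
  by_cases h1 : s = "poor_metabolizer" <;>
  by_cases h2 : s = "intermediate_metabolizer" <;>
  by_cases h3 : s = "ultrarapid_metabolizer" <;>
  simp [pvLadder, pvRank, h1, h2, h3] <;>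
  split_ifs <;> first | omega | simp_all

theorem pvFilterMap_if (p : String → Bool) (f : String → Nat) (l : List String) :
    l.filterMap (fun v => if p v then some (f v) else none) = (l.filter p).map f := by
  induction l with
  | nil => rfl
  | cons x xs ih => by_cases h : p x <;> simp [h, ih]

theorem pvMinFold (f : Option Nat → Nat → Option Nat)
    (hf : ∀ m x, f (some m) x = some (min m x)) (S : List String) :
    ∀ (a : Nat), a ≤ 3 →
      List.foldl f (some a) (S.map pvRank) = some (min a (pvLadder S)) := by
  induction S with
  | nil => intro a ha; simp [pvLadder, Nat.min_eq_left ha]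
  | cons s S ih =>
    intro a ha
    simp only [List.map_cons, List.foldl_cons, hf]
    rw [ih (min a (pvRank s)) (by have := pvRank_le s; omega), pvLadder_cons, Nat.min_assoc]

theorem pvMinFoldNone (f : Option Nat → Nat → Option Nat)
    (hf0 : ∀ x, f none x = some x)
    (hf : ∀ m x, f (some m) x = some (min m x)) (S : List String) :
    (List.foldl f none (S.map pvRank)).getD 3 = pvLadder S := by
  cases S with
  | nil => simp [pvLadder]
  | cons s S =>
    have hs := pvRank_le s
    simp only [List.map_cons, List.foldl_cons, hf0]
    rw [pvMinFold f hf S (pvRank s) hs]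
    simp [pvLadder_cons, Nat.min_comm]

theorem pvMinD_eq (S : List String) :
    PySem.List.minD (S.map pvRank) (fun r => r) 3 = pvLadder S := by
  simp only [PySem.List.minD, PySem.List.min?]
  exact pvMinFoldNone _ (fun x => rfl)
    (fun m x => by rw [Nat.min_def]; split_ifs <;> first | rfl | omega | simp_all) S

theorem pvMinD_eq' (g : String → String) (l : List String) :
    PySem.List.minD (l.map (fun v => pvRank (g v))) (fun r => r) 3 = pvLadder (l.map g) := by
  have h : l.map (fun v => pvRank (g v)) = (l.map g).map pvRank := by
    rw [List.map_map]; rfl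
  rw [h, pvMinD_eq]

-- ===== VERDICT (by name: the statement is the Claim_ definition above) =====
theorem determine_metabolizer_status_py_spec : Claim_equal_determine_metabolizer_status_py := by
  intro pgx_variants enzyme variant_status _
  unfold Spec_determine_metabolizer_status_py determine_metabolizer_status_py determine_metabolizer_status_py_alt
  simp only
  set vsd := PySem.Dict.mk variant_status with hvsd
  set K := (PySem.Dict.mk pgx_variants).keys with hK
  -- B's rank list is the pvRank-image of A's status list
  have hranks :
      K.filterMap (fun v => if PySem.Str.startswith v enzyme && vsd.contains v
                            then some (pvRank (vsd.getD v "")) else none)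
      = ((K.filter (fun v => PySem.Str.startswith v enzyme)).filter vsd.contains).map
          (fun v => pvRank (vsd.getD v "")) := by
    rw [pvFilterMap_if (fun v => PySem.Str.startswith v enzyme && vsd.contains v)
         (fun v => pvRank (vsd.getD v "")) K]
    rw [List.filter_filter]
    congr 1
    apply List.filter_congr
    intro a _
    rw [Bool.and_comm]
  rw [hranks,
    pvMinD_eq' (fun v => vsd.getD v "")
      ((K.filter (fun v => PySem.Str.startswith v enzyme)).filter vsd.contains)]
  rw [PySem.List.foldl_append_if vsd.contains (fun v => vsd.getD v "")
        (K.filter (fun v => PySem.Str.startswith v enzyme)) []]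
  simp only [List.nil_append]
  by_cases hempty : (K.filter (fun v => PySem.Str.startswith v enzyme)).isEmpty
  · rw [List.isEmpty_iff] at hempty
    rw [hempty]
    simp [pvLadder]
  · simp only [hempty, Bool.false_eq_true, if_false]
    unfold pvLadder
    split_ifs <;> rfl
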